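-- pv_equiv track=rewrite | github.com/dr3d/prolog-reasoning-v2 | scripts/install_hermes_mcp.py | _find_mcp_servers_section
-- ===== SOURCE A (Python) =====
-- def _indent(line: str) -> int:
--     return len(line) - len(line.lstrip(" "))
--
-- def _is_top_level_key(line: str) -> bool:
--     stripped = line.strip()
--     return bool(stripped) and not stripped.startswith("#") and _indent(line) == 0 and stripped.endswith(":")
--
-- def _find_mcp_servers_section(lines: list[str]) -> tuple[int | None, int | None]:
--     start = None
--     for i, line in enumerate(lines):
--         if line.strip() == "mcp_servers:" and _indent(line) == 0:
--             start = i
--             break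
--     if start is None:
--         return None, None
--
--     end = len(lines)
--     for j in range(start + 1, len(lines)):
--         if _is_top_level_key(lines[j]):
--             end = j
--             break
--     return start, end
-- ===== SOURCE B (Python) =====
-- def _is_key_line(line):
--     s = line.strip()
--     return bool(s) and not s.startswith("#") and not line.startswith(" ") and s.endswith(":")
--
-- def _find_mcp_servers_section(lines):
--     keys = [(i, line) for i, line in enumerate(lines) if _is_key_line(line)]
--     starts = [i for i, _ in keys]
--     for (i, line), nxt in zip(keys, starts[1:] + [len(lines)]):
--         if line.strip() == "mcp_servers:":
--             return i, nxt
--     return None, None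
-- ===== Notes on version B (the rewrite author's own statement) =====
-- stated objective: alternative
-- what changed: A scans once for the start line and then re-scans by index over range(start+1, len(lines)) for the next top-level key; B collects all top-level key lines with their indices in one pass, zips each key with the start of the following key (or len(lines)), and returns the first zipped entry whose line strips to 'mcp_servers:'.
import Mathlib
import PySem

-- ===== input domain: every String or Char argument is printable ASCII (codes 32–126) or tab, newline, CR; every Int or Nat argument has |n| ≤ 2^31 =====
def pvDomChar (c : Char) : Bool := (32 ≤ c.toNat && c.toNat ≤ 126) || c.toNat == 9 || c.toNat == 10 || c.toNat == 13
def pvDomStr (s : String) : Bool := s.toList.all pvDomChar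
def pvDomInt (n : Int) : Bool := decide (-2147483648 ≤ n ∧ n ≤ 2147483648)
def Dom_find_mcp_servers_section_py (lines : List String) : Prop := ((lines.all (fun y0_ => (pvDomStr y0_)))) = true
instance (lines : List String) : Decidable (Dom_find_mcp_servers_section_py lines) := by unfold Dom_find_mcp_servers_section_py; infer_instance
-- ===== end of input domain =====

-- B replaces A's two positional scans (find start, then re-scan by index for the next
-- top-level key) by one pass that collects all top-level key lines with their indices and
-- zips each with the start of the following key; objective: alternative decomposition.

-- ===== PORT A =====

-- len(line) - len(line.lstrip(" ")): lstrip(" ") ported by hand as dropWhile (· == ' ')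
-- on the char list, which is exact (Python lstrip(" ") removes exactly the leading spaces).
def pyIndent (line : String) : Int :=
  PySem.Str.len line - ((line.toList.dropWhile (fun c => c == ' ')).length : Int)

def pyIsTopLevelKey (line : String) : Bool :=
  let stripped := PySem.Str.strip line
  (stripped != "") && !(PySem.Str.startswith stripped "#") &&
    (pyIndent line == 0) && PySem.Str.endswith stripped ":"

-- the first 'for i, line in enumerate(lines): … break' loop
def findStartA (lines : List String) (i : Int) : Option Int :=
  match lines with
  | [] => none
  | l :: ls =>
    if (PySem.Str.strip l == "mcp_servers:") && (pyIndent l == 0) then some i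
    else findStartA ls (i + 1)

-- the 'for j in range(start + 1, len(lines)): … break' loop
def findEndA (js : List Int) (lines : List String) (dflt : Int) : Int :=
  match js with
  | [] => dflt
  | j :: rest =>
    if pyIsTopLevelKey (PySem.List.pyGetD lines j "") then j else findEndA rest lines dflt

def find_mcp_servers_section_py (lines : List String) : Option Int × Option Int :=
  match findStartA lines 0 with
  | none => (none, none)
  | some start =>
    (some start,
     some (findEndA (PySem.List.pyRange (start + 1) (lines.length : Int) 1) lines
            (lines.length : Int)))

-- ===== PORT B =====

def isKeyLine (line : String) : Bool :=
  let s := PySem.Str.strip line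
  (s != "") && !(PySem.Str.startswith s "#") &&
    !(PySem.Str.startswith line " ") && PySem.Str.endswith s ":"

def scanB (pairs : List ((Int × String) × Int)) : Option Int × Option Int :=
  match pairs with
  | [] => (none, none)
  | ((i, line), nxt) :: rest =>
    if PySem.Str.strip line == "mcp_servers:" then (some i, some nxt) else scanB rest

def find_mcp_servers_section_py_alt (lines : List String) : Option Int × Option Int :=
  let keys := (PySem.List.enumerate lines 0).filter (fun p => isKeyLine p.2)
  let starts := keys.map (·.1)
  scanB (keys.zip (starts.drop 1 ++ [(lines.length : Int)]))

-- ===== PRECONDITION & SPEC =====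
def Spec_find_mcp_servers_section_py (lines : List String) (out : Option Int × Option Int) : Prop := out = find_mcp_servers_section_py_alt lines
instance (lines : List String) (out : Option Int × Option Int) : Decidable (Spec_find_mcp_servers_section_py lines out) := by unfold Spec_find_mcp_servers_section_py; infer_instance

-- ===== CLAIM (what is proved, stated in full; the proofs are below) =====
def Claim_equal_find_mcp_servers_section_py : Prop := ∀ (lines : List String), Dom_find_mcp_servers_section_py lines → Spec_find_mcp_servers_section_py lines (find_mcp_servers_section_py lines)

-- ===== LEMMAS AND PROOFS =====

-- reference shape both ports are reduced to: one structural scan for the start,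
-- then one structural scan of the remaining suffix for the end
def refEnd (suffix : List String) (j dflt : Int) : Int :=
  match suffix with
  | [] => dflt
  | l :: ls => if pyIsTopLevelKey l then j else refEnd ls (j + 1) dflt

def refGo (suffix : List String) (i n : Int) : Option Int × Option Int :=
  match suffix with
  | [] => (none, none)
  | l :: ls =>
    if (PySem.Str.strip l == "mcp_servers:") && (pyIndent l == 0)
    then (some i, some (refEnd ls (i + 1) n))
    else refGo ls (i + 1) n

lemma indent_zero_iff (line : String) :
    ((pyIndent line == 0) : Bool) = !(PySem.Str.startswith line " ") := by
  simp only [pyIndent, PySem.Str.len_eq, PySem.Str.startswith_eq]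
  cases h : line.toList with
  | nil => simp [PySem.Chars.startswith]
  | cons c cs =>
    simp only [PySem.Chars.startswith]
    by_cases hc : c = ' '
    · subst hc
      have hle := List.length_dropWhile_le (fun c => c == ' ') cs
      simp [List.dropWhile]
      omega
    · have hc' : (c == ' ') = false := by simp [hc]
      have hc'' : (' ' == c) = false := by simp [Ne.symm hc]
      simp [List.dropWhile, hc', hc'', List.isPrefixOf]

lemma keyEq (l : String) : pyIsTopLevelKey l = isKeyLine l := by
  simp only [pyIsTopLevelKey, isKeyLine, indent_zero_iff]

lemma cond_split (l : String) :
    ((PySem.Str.strip l == "mcp_servers:") && (pyIndent l == 0))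
      = ((PySem.Str.strip l == "mcp_servers:") && isKeyLine l) := by
  by_cases hM : PySem.Str.strip l = "mcp_servers:"
  · have h1 : PySem.Chars.startswith
        ['m','c','p','_','s','e','r','v','e','r','s',':'] ['#'] = false := by decide
    have h2 : PySem.Chars.endswith
        ['m','c','p','_','s','e','r','v','e','r','s',':'] [':'] = true := by decide
    simp [isKeyLine, hM, indent_zero_iff, h1, h2]
  · have hM' : (PySem.Str.strip l == "mcp_servers:") = false := by simp [hM]
    simp [hM']

lemma findEndA_eq (suffix : List String) : ∀ (pre : List String) (dflt : Int),
    findEndA (PySem.List.pyRange (pre.length : Int) ((pre ++ suffix).length : Int) 1)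
      (pre ++ suffix) dflt = refEnd suffix (pre.length : Int) dflt := by
  induction suffix with
  | nil =>
    intro pre dflt
    rw [PySem.List.pyRange_one_eq_nil (by simp)]
    rfl
  | cons l ls ih =>
    intro pre dflt
    rw [PySem.List.pyRange_one_cons (by simp)]
    have hget : PySem.List.pyGetD (pre ++ l :: ls) (pre.length : Int) "" = l := by
      simp [PySem.List.pyGetD_natCast]
    simp only [findEndA, hget, refEnd]
    by_cases hk : pyIsTopLevelKey l
    · simp [hk]
    · simp only [hk, Bool.false_eq_true, if_false]
      rw [show pre ++ l :: ls = (pre ++ [l]) ++ ls from by simp,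
          show ((pre.length : Int) + 1) = (((pre ++ [l]).length : Nat) : Int) from by simp]
      exact ih (pre ++ [l]) dflt

lemma A_ref (suffix : List String) : ∀ (pre : List String),
    (match findStartA suffix (pre.length : Int) with
     | none => ((none, none) : Option Int × Option Int)
     | some s =>
       (some s,
        some (findEndA (PySem.List.pyRange (s + 1) (((pre ++ suffix).length : Nat) : Int) 1)
               (pre ++ suffix) ((pre ++ suffix).length : Int))))
    = refGo suffix (pre.length : Int) ((pre ++ suffix).length : Int) := by
  induction suffix with
  | nil => intro pre; rfl
  | cons l ls ih =>
    intro pre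
    simp only [findStartA, refGo]
    by_cases hs : ((PySem.Str.strip l == "mcp_servers:") && (pyIndent l == 0)) = true
    · simp only [hs, if_true]
      rw [show pre ++ l :: ls = (pre ++ [l]) ++ ls from by simp,
          show ((pre.length : Int) + 1) = (((pre ++ [l]).length : Nat) : Int) from by simp,
          findEndA_eq ls (pre ++ [l])]
    · simp only [hs, Bool.false_eq_true, if_false]
      rw [show pre ++ l :: ls = (pre ++ [l]) ++ ls from by simp,
          show ((pre.length : Int) + 1) = (((pre ++ [l]).length : Nat) : Int) from by simp]
      exact ih (pre ++ [l])

lemma starts_headD (suffix : List String) (o dflt : Int) :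
    ((((PySem.List.enumerate suffix o).filter (fun p => isKeyLine p.2)).map (·.1)).headD dflt)
      = refEnd suffix o dflt := by
  induction suffix generalizing o dflt with
  | nil => rfl
  | cons l ls ih =>
    simp only [PySem.List.enumerate_cons, List.filter_cons, refEnd, keyEq]
    by_cases hk : isKeyLine l
    · simp [hk]
    · simp only [hk, if_false, Bool.false_eq_true]
      exact ih (o + 1) dflt

lemma B_ref (suffix : List String) (o n : Int) :
    scanB (((PySem.List.enumerate suffix o).filter (fun p => isKeyLine p.2)).zip
            ((((PySem.List.enumerate suffix o).filter (fun p => isKeyLine p.2)).map (·.1)).drop 1 ++ [n]))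
      = refGo suffix o n := by
  induction suffix generalizing o n with
  | nil => rfl
  | cons l ls ih =>
    simp only [PySem.List.enumerate_cons, List.filter_cons, refGo, cond_split]
    by_cases hk : isKeyLine l
    · simp only [hk, if_true, Bool.and_true]
      cases hkeys : (PySem.List.enumerate ls (o + 1)).filter (fun p => isKeyLine p.2) with
      | nil =>
        simp only [List.map_nil, List.map_cons, List.drop_succ_cons, List.drop_nil,
          List.nil_append, List.zip_cons_cons, List.zip_nil_right, scanB]
        by_cases hM : (PySem.Str.strip l == "mcp_servers:") = true
        · simp only [hM, if_true]
          have hh := starts_headD ls (o + 1) n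
          rw [hkeys] at hh
          simp only [List.map_nil, List.headD_nil] at hh
          rw [← hh]
        · have hB := ih (o + 1) n
          rw [hkeys] at hB
          simp only [List.zip_nil_left, scanB] at hB
          simp only [hM, Bool.false_eq_true, if_false]
          exact hB
      | cons k0 rest =>
        simp only [List.map_cons, List.drop_succ_cons, List.drop_zero,
          List.cons_append, List.zip_cons_cons, scanB]
        by_cases hM : (PySem.Str.strip l == "mcp_servers:") = true
        · simp only [hM, if_true]
          have hh := starts_headD ls (o + 1) n
          rw [hkeys] at hh
          simp only [List.map_cons, List.headD_cons] at hh
          rw [← hh]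
        · simp only [hM, Bool.false_eq_true, if_false]
          have hB := ih (o + 1) n
          rw [hkeys] at hB
          simpa using hB
    · simp only [hk, if_false, Bool.and_false, Bool.false_eq_true, if_false]
      exact ih (o + 1) n

-- ===== VERDICT (by name: the statement is the Claim_ definition above) =====
theorem find_mcp_servers_section_py_spec : Claim_equal_find_mcp_servers_section_py := by
  intro lines _
  unfold Spec_find_mcp_servers_section_py
  have hA := A_ref lines []
  have hB := B_ref lines 0 (lines.length : Int)
  simp only [List.nil_append, List.length_nil, Nat.cast_zero] at hA
  unfold find_mcp_servers_section_py find_mcp_servers_section_py_alt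
  exact hA.trans hB.symm
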